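-- pv_equiv track=rewrite | github.com/Nathan-W123/Quantize | backend/symmetry.py | _equiv_groups
-- ===== SOURCE A (Python) =====
-- from typing import List, Optional, Tuple
--
-- def _equiv_groups(n: int, perms: List[List[int]]) -> List[List[int]]:
--     """Union-find: collect atoms connected by any symmetry permutation."""
--     parent = list(range(n))
--
--     def find(x: int) -> int:
--         while parent[x] != x:
--             parent[x] = parent[parent[x]]
--             x = parent[x]
--         return x
--
--     for perm in perms:
--         for i, j in enumerate(perm):
--             pi, pj = find(i), find(j)
--             if pi != pj:
--                 parent[pi] = pj
--
--     groups: dict = {}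
--     for i in range(n):
--         groups.setdefault(find(i), []).append(i)
--     return list(groups.values())
-- ===== SOURCE B (Python) =====
-- def _equiv_groups(n, perms):
--     """Label propagation: keep a flat label array and relabel a whole class on each merge."""
--     comp = list(range(n))
--     for perm in perms:
--         for i, j in enumerate(perm):
--             ri, rj = comp[i], comp[j]
--             if ri != rj:
--                 comp = [rj if c == ri else c for c in comp]
--     groups = {}
--     for i in range(n):
--         groups.setdefault(comp[i], []).append(i)
--     return list(groups.values())
-- ===== Notes on version B (the rewrite author's own statement) =====
-- stated objective: alternative
-- what changed: Replaces A's union-find forest (parent array, find loop with path compression, root unions) by a flat label array that is relabelled wholesale on each merge, so grouping reads labels directly with no find calls.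
import Mathlib
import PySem

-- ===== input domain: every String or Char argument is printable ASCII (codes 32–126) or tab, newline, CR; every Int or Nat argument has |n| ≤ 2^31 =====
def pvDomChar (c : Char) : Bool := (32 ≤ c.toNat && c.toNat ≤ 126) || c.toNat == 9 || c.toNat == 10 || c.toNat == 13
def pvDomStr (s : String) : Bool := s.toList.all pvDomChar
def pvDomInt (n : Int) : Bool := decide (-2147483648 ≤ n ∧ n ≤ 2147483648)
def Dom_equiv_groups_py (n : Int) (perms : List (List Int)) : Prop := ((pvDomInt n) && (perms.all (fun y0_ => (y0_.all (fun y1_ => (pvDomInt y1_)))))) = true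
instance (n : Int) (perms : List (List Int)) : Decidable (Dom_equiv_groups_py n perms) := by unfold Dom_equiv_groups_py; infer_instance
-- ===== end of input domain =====

-- B replaces A's union-find forest (find loop with path compression) by a flat label
-- array relabelled wholesale on each merge: an alternative algorithm of similar size.

-- ===== PORT A =====
-- the inner `find` loop: while parent[x] != x: parent[x] = parent[parent[x]]; x = parent[x]
-- (fuel makes the loop total; under Pre_ the root is always reached within the fuel)
def pvFind (fuel : Nat) (parent : List Int) (x : Int) : Int × List Int :=
  match fuel with
  | 0 => (x, parent)
  | fuel + 1 =>
    let p := PySem.List.pyGetD parent x 0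
    if p = x then (x, parent)
    else
      let t := PySem.List.pyGetD parent p 0
      pvFind fuel (PySem.List.pySetD parent x t) t

-- loop body for `for i, j in enumerate(perm): pi, pj = find(i), find(j); if pi != pj: parent[pi] = pj`
def pvUnionStep (P : List Int) (ij : Int × Int) : List Int :=
  let r1 := pvFind (P.length + 1) P ij.1
  let r2 := pvFind (r1.2.length + 1) r1.2 ij.2
  if r1.1 ≠ r2.1 then PySem.List.pySetD r2.2 r1.1 r2.1 else r2.2

def equiv_groups_py (n : Int) (perms : List (List Int)) : List (List Int) :=
  let parent0 := (List.range n.toNat).map Int.ofNat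
  let parent1 := perms.foldl (fun P perm => (PySem.List.enumerate perm).foldl pvUnionStep P) parent0
  let st := (PySem.List.pyRange 0 n 1).foldl
    (fun (st : List Int × PySem.Dict Int (List Int)) i =>
      let r := pvFind (st.1.length + 1) st.1 i
      (r.2, st.2.modify r.1 [] (fun xs => xs ++ [i])))
    (parent1, PySem.Dict.empty)
  st.2.values

-- ===== PORT B =====
-- loop body for `ri, rj = comp[i], comp[j]; if ri != rj: comp = [rj if c == ri else c for c in comp]`
def pvMergeStep (c : List Int) (ij : Int × Int) : List Int :=
  let ri := PySem.List.pyGetD c ij.1 0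
  let rj := PySem.List.pyGetD c ij.2 0
  if ri ≠ rj then c.map (fun v => if v = ri then rj else v) else c

def equiv_groups_py_alt (n : Int) (perms : List (List Int)) : List (List Int) :=
  let comp0 := (List.range n.toNat).map Int.ofNat
  let comp := perms.foldl (fun c perm => (PySem.List.enumerate perm).foldl pvMergeStep c) comp0
  ((PySem.List.pyRange 0 n 1).foldl
    (fun (g : PySem.Dict Int (List Int)) i =>
      g.modify (PySem.List.pyGetD comp i 0) [] (fun xs => xs ++ [i]))
    PySem.Dict.empty).values

-- ===== PRECONDITION & SPEC =====
-- Pre_ is exactly the set of inputs on which A returns (A raises IndexError iff some perm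
-- is longer than n or contains an entry outside [-n, n); B raises there too).
def Pre_equiv_groups_py (n : Int) (perms : List (List Int)) : Prop :=
  ∀ perm ∈ perms, perm.length ≤ n.toNat ∧ ∀ j ∈ perm, -n ≤ j ∧ j < n
instance (n : Int) (perms : List (List Int)) : Decidable (Pre_equiv_groups_py n perms) := by
  unfold Pre_equiv_groups_py; infer_instance

def pvWitness_equiv_groups_py : Int × List (List Int) := (4, [[1, 2, 0, 3], [0, 1, 3, -2]])

def Spec_equiv_groups_py (n : Int) (perms : List (List Int)) (out : List (List Int)) : Prop := out = equiv_groups_py_alt n perms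
instance (n : Int) (perms : List (List Int)) (out : List (List Int)) : Decidable (Spec_equiv_groups_py n perms out) := by unfold Spec_equiv_groups_py; infer_instance

-- ===== CLAIM (what is proved, stated in full; the proofs are below) =====
def Claim_equal_equiv_groups_py : Prop := ∀ (n : Int) (perms : List (List Int)), Dom_equiv_groups_py n perms → Pre_equiv_groups_py n perms → Spec_equiv_groups_py n perms (equiv_groups_py n perms)

-- ===== LEMMAS AND PROOFS =====

-- nat view of one parent-pointer step
def pvPg (P : List Int) (k : Nat) : Nat := (P.getD k 0).toNat

-- follow parent pointers d times, stopping at a self-loop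
def pvIter (P : List Int) : Nat → Nat → Nat
  | 0, k => k
  | d + 1, k => if pvPg P k = k then k else pvIter P d (pvPg P k)

-- "from k the root is reached within d steps"
def pvRooted (P : List Int) (d k : Nat) : Prop := pvPg P (pvIter P d k) = pvIter P d k

-- size of the label class of c among 0..n'-1
def pvCcard (n' : Nat) (comp : List Int) (c : Int) : Nat :=
  (List.range n').countP (fun m => comp.getD m 0 = c)

-- the simulation invariant between A's parent forest and B's label array
structure PVInv (n' : Nat) (P comp : List Int) : Prop where
  lenP : P.length = n'
  lenC : comp.length = n'
  rng : ∀ k < n', 0 ≤ P.getD k 0 ∧ P.getD k 0 < (n' : Int)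
  crng : ∀ k < n', 0 ≤ comp.getD k 0 ∧ comp.getD k 0 < (n' : Int)
  compat : ∀ k < n', comp.getD (pvPg P k) 0 = comp.getD k 0
  rootlab : ∀ k < n', pvPg P k = k → comp.getD k 0 = (k : Int)
  reach : ∀ k < n', ∃ d, pvRooted P d k ∧ d + 1 ≤ pvCcard n' comp (comp.getD k 0)

theorem pvIter_of_root {P : List Int} {k : Nat} (h : pvPg P k = k) (d : Nat) : pvIter P d k = k := by
  induction d with
  | zero => rfl
  | succ d ih => simp [pvIter, h]

theorem pvRooted_succ_of_ne {P : List Int} {k : Nat} (h : pvPg P k ≠ k) (d : Nat) :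
    pvRooted P (d + 1) k ↔ pvRooted P d (pvPg P k) := by
  simp [pvRooted, pvIter, h]

theorem pvRooted_succ {P : List Int} {d k : Nat} (h : pvRooted P d k) : pvRooted P (d + 1) k := by
  induction d generalizing k with
  | zero =>
    have hk : pvPg P k = k := h
    simp [pvRooted, pvIter, hk]
  | succ d ih =>
    by_cases hk : pvPg P k = k
    · simp [pvRooted, pvIter, hk]
    · rw [pvRooted_succ_of_ne hk] at h ⊢
      exact ih h

theorem pvRooted_mono {P : List Int} {d e k : Nat} (h : pvRooted P d k) (hde : d ≤ e) : pvRooted P e k := by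
  induction e with
  | zero => simpa [Nat.le_zero.mp hde] using h
  | succ e ih =>
    rcases Nat.lt_or_ge d (e+1) with h1 | h1
    · exact pvRooted_succ (ih (Nat.lt_succ_iff.mp h1))
    · have : d = e + 1 := le_antisymm hde h1
      simpa [this] using h

-- helper: getD after set
theorem pv_getD_set {P : List Int} {i j : Nat} {v : Int} :
    (P.set i v).getD j 0 = if i = j ∧ i < P.length then v else P.getD j 0 := by
  simp only [List.getD_eq_getElem?_getD, List.getElem?_set]
  by_cases h1 : i = j
  · subst h1
    by_cases h2 : i < P.length
    · simp [h2]
    · simp [h2]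
  · simp [h1]

theorem pvPg_set {P : List Int} {i j : Nat} {v : Int} :
    pvPg (P.set i v) j = if i = j ∧ i < P.length then v.toNat else pvPg P j := by
  simp only [pvPg, pv_getD_set]; split_ifs <;> rfl

-- a 2-cycle never reaches a root
theorem pv_no_cycle {P : List Int} {x : Nat} (hx : pvPg P x ≠ x) (hc : pvPg P (pvPg P x) = x) :
    ∀ d, ¬ pvRooted P d x := by
  have hpx : pvPg P x ≠ x := hx
  have key : ∀ m a, (a = x ∨ a = pvPg P x) → pvIter P m a = x ∨ pvIter P m a = pvPg P x := by
    intro m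
    induction m with
    | zero => intro a ha; simpa [pvIter] using ha
    | succ m ih =>
      intro a ha
      rcases ha with rfl | rfl
      · rw [show pvIter P (m + 1) a = pvIter P m (pvPg P a) from by simp [pvIter, hx]]
        exact ih _ (Or.inr rfl)
      · have hax : pvPg P x ≠ x := hx
        have hstep : pvPg P (pvPg P x) ≠ pvPg P x := by rw [hc]; exact fun h => hx h.symm
        rw [show pvIter P (m + 1) (pvPg P x) = pvIter P m (pvPg P (pvPg P x)) from by
          simp [pvIter, hstep]]
        rw [hc]
        exact ih _ (Or.inl rfl)
  intro d hd
  rcases key d x (Or.inl rfl) with h | h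
  · unfold pvRooted at hd; rw [h] at hd; exact hx hd
  · unfold pvRooted at hd; rw [h, hc] at hd; exact hx hd.symm

-- path compression preserves rootedness bounds
theorem pvPg_set' {P : List Int} {x : Nat} (hxlen : x < P.length) (v : Nat) (m : Nat) :
    pvPg (P.set x ((v : Nat) : Int)) m = if x = m then v else pvPg P m := by
  rw [pvPg_set]
  by_cases h : x = m
  · subst h; rw [if_pos ⟨rfl, hxlen⟩]; simp
  · rw [if_neg (fun hc => h hc.1), if_neg h]

theorem pv_compress_rooted {P : List Int} {x : Nat} (hxlen : x < P.length)
    (hx : pvPg P x ≠ x) (hreach : ∃ dx, pvRooted P dx x) :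
    ∀ d k, pvRooted P d k → pvRooted (P.set x ((pvPg P (pvPg P x) : Nat) : Int)) d k := by
  set Q := P.set x ((pvPg P (pvPg P x) : Nat) : Int) with hQdef
  have hQ : ∀ m, pvPg Q m = if x = m then pvPg P (pvPg P x) else pvPg P m := fun m =>
    pvPg_set' hxlen _ m
  intro d
  induction d using Nat.strong_induction_on with
  | _ d ih =>
  intro k hd
  by_cases hroot : pvPg P k = k
  · have hkx : k ≠ x := fun he => hx (by rw [← he] at *; exact hroot)
    have hQk : pvPg Q k = k := by rw [hQ, if_neg (fun he => hkx he.symm)]; exact hroot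
    unfold pvRooted; rw [pvIter_of_root hQk]; exact hQk
  · have hd1 : d ≠ 0 := fun h0 => hroot (by simpa [h0, pvRooted, pvIter] using hd)
    obtain ⟨e, rfl⟩ : ∃ e, d = e + 1 := ⟨d - 1, by omega⟩
    have hd' : pvRooted P e (pvPg P k) := (pvRooted_succ_of_ne hroot e).mp hd
    by_cases hkx : k = x
    · subst hkx
      by_cases hp : pvPg P (pvPg P k) = pvPg P k
      · have hpx : pvPg P k ≠ k := hroot
        have hpne : pvPg P k ≠ k := hroot
        have hpkx : pvPg P k ≠ k := hroot
        have hQk : pvPg Q k = pvPg P k := by rw [hQ, if_pos rfl]; exact hp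
        have hQp : pvPg Q (pvPg P k) = pvPg P k := by
          rw [hQ, if_neg (fun he => hroot he.symm)]; exact hp
        have hne : pvPg Q k ≠ k := by rw [hQk]; exact hroot
        rw [pvRooted_succ_of_ne hne]
        rw [hQk]
        unfold pvRooted; rw [pvIter_of_root hQp]; exact hQp
      · have he1 : e ≠ 0 := fun h0 => hp (by simpa [h0, pvRooted, pvIter] using hd')
        obtain ⟨f, rfl⟩ : ∃ f, e = f + 1 := ⟨e - 1, by omega⟩
        have hd'' : pvRooted P f (pvPg P (pvPg P k)) := (pvRooted_succ_of_ne hp f).mp hd'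
        have htx : pvPg P (pvPg P k) ≠ k := by
          intro he
          obtain ⟨dx, hdx⟩ := hreach
          exact pv_no_cycle hx he dx hdx
        have hQrec : pvRooted Q f (pvPg P (pvPg P k)) := ih f (by omega) _ hd''
        have hQk : pvPg Q k = pvPg P (pvPg P k) := by rw [hQ, if_pos rfl]
        have hne : pvPg Q k ≠ k := by rw [hQk]; exact htx
        rw [pvRooted_succ_of_ne hne, hQk]
        exact pvRooted_mono hQrec (by omega)
    · have hQk : pvPg Q k = pvPg P k := by rw [hQ, if_neg (fun he => hkx he.symm)]
      have hrec : pvRooted Q e (pvPg P k) := ih e (by omega) _ hd'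
      have hne : pvPg Q k ≠ k := by rw [hQk]; exact hroot
      rw [pvRooted_succ_of_ne hne, hQk]
      exact hrec

-- path compression preserves the full invariant
theorem pv_compress_inv {n' : Nat} {P comp : List Int} (hInv : PVInv n' P comp)
    {x : Nat} (hxn : x < n') (hx : pvPg P x ≠ x) :
    PVInv n' (P.set x ((pvPg P (pvPg P x) : Nat) : Int)) comp := by
  have hxlen : x < P.length := by rw [hInv.lenP]; exact hxn
  have hpx : pvPg P x < n' := by have := hInv.rng x hxn; unfold pvPg; omega
  have hppx : pvPg P (pvPg P x) < n' := by
    have := hInv.rng _ hpx; simp only [pvPg] at this ⊢; omega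
  set Q := P.set x ((pvPg P (pvPg P x) : Nat) : Int) with hQdef
  have hQ : ∀ m, pvPg Q m = if x = m then pvPg P (pvPg P x) else pvPg P m := fun m =>
    pvPg_set' hxlen _ m
  refine ⟨by simp [hQdef, hInv.lenP], hInv.lenC, ?_, hInv.crng, ?_, ?_, ?_⟩
  · intro k hk
    rw [hQdef, pv_getD_set]
    by_cases h : x = k ∧ x < P.length
    · rw [if_pos h]; constructor
      · positivity
      · exact_mod_cast hppx
    · rw [if_neg h]; exact hInv.rng k hk
  · intro k hk
    rw [hQ]
    by_cases h : x = k
    · subst h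
      rw [if_pos rfl]
      rw [hInv.compat _ hpx, hInv.compat _ hk]
    · rw [if_neg h]; exact hInv.compat k hk
  · intro k hk hQk
    rw [hQ] at hQk
    by_cases h : x = k
    · subst h
      rw [if_pos rfl] at hQk
      obtain ⟨dx, hdx, _⟩ := hInv.reach x hk
      exact absurd hdx (pv_no_cycle hx hQk dx)
    · rw [if_neg h] at hQk
      exact hInv.rootlab k hk hQk
  · intro k hk
    obtain ⟨d, hd, hc⟩ := hInv.reach k hk
    obtain ⟨dx, hdx, _⟩ := hInv.reach x hxn
    exact ⟨d, pv_compress_rooted hxlen hx ⟨dx, hdx⟩ d k hd, hc⟩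

-- the label class is constant along parent paths, and paths stay in range
theorem pv_iter_range {n' : Nat} {P comp : List Int} (hInv : PVInv n' P comp) :
    ∀ d k, k < n' → pvIter P d k < n' ∧ comp.getD (pvIter P d k) 0 = comp.getD k 0 := by
  intro d
  induction d with
  | zero => intro k hk; exact ⟨hk, rfl⟩
  | succ d ih =>
    intro k hk
    by_cases h : pvPg P k = k
    · rw [pvIter_of_root h]; exact ⟨hk, rfl⟩
    · rw [show pvIter P (d + 1) k = pvIter P d (pvPg P k) from by simp [pvIter, h]]
      have hpk : pvPg P k < n' := by
        have := hInv.rng k hk; unfold pvPg; omega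
      obtain ⟨h1, h2⟩ := ih _ hpk
      exact ⟨h1, h2.trans (hInv.compat k hk)⟩

-- a reached root carries the node's label
theorem pv_root_label {n' : Nat} {P comp : List Int} (hInv : PVInv n' P comp)
    {d k : Nat} (hk : k < n') (h : pvRooted P d k) :
    ((pvIter P d k : Nat) : Int) = comp.getD k 0 := by
  obtain ⟨h1, h2⟩ := pv_iter_range hInv d k hk
  have h3 := hInv.rootlab _ h1 h
  rw [← h2, h3]

theorem pvCcard_le {n' : Nat} (comp : List Int) (c : Int) : pvCcard n' comp c ≤ n' := by
  simpa [pvCcard] using (List.countP_le_length (l := List.range n') (p := fun m => decide (comp.getD m 0 = c)))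

theorem pvFind_succ (f : Nat) (P : List Int) (x : Int) :
    pvFind (f + 1) P x = if PySem.List.pyGetD P x 0 = x then (x, P)
      else pvFind f
        (PySem.List.pySetD P x (PySem.List.pyGetD P (PySem.List.pyGetD P x 0) 0))
        (PySem.List.pyGetD P (PySem.List.pyGetD P x 0) 0) := rfl

theorem pvFind_root {P : List Int} {x : Int} (h : PySem.List.pyGetD P x 0 = x) (f : Nat) :
    pvFind f P x = (x, P) := by
  cases f with
  | zero => rfl
  | succ f => rw [pvFind_succ, if_pos h]

theorem pv_pyGetD_wrap (xs : List Int) {j : Int} (h1 : -(xs.length : Int) ≤ j) (h2 : j < 0) (d : Int) :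
    PySem.List.pyGetD xs j d = PySem.List.pyGetD xs (j + xs.length) d := by
  have e1 : PySem.List.pyIdx? xs.length j = some ((j + xs.length).toNat) := by
    unfold PySem.List.pyIdx?
    rw [if_neg (by omega), if_pos h1]
    congr 1
    omega
  have e2 : PySem.List.pyIdx? xs.length (j + xs.length) = some ((j + xs.length).toNat) := by
    unfold PySem.List.pyIdx?
    rw [if_pos (by omega), if_pos (by omega)]
  unfold PySem.List.pyGetD PySem.List.pyGet?
  rw [e1, e2]

theorem pv_pySetD_wrap (xs : List Int) {j : Int} (h1 : -(xs.length : Int) ≤ j) (h2 : j < 0) (v : Int) :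
    PySem.List.pySetD xs j v = PySem.List.pySetD xs (j + xs.length) v := by
  have e1 : PySem.List.pyIdx? xs.length j = some ((j + xs.length).toNat) := by
    unfold PySem.List.pyIdx?
    rw [if_neg (by omega), if_pos h1]
    congr 1
    omega
  have e2 : PySem.List.pyIdx? xs.length (j + xs.length) = some ((j + xs.length).toNat) := by
    unfold PySem.List.pyIdx?
    rw [if_pos (by omega), if_pos (by omega)]
  unfold PySem.List.pySetD PySem.List.pySet?
  rw [e1, e2]

theorem pv_set_self {P : List Int} {k : Nat} (h : k < P.length) : P.set k (P.getD k 0) = P := by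
  apply List.ext_getElem (by simp)
  intro i h1 h2
  rw [List.getElem_set]
  split_ifs with he
  · subst he; exact (List.getD_eq_getElem P 0 h).symm ▸ rfl
  · rfl

-- find returns the node's B-label and preserves the invariant
theorem pv_find_spec {n' : Nat} {comp : List Int} :
    ∀ d (P : List Int), PVInv n' P comp → ∀ x : Nat, x < n' → pvRooted P d x → ∀ fuel, d < fuel →
      (pvFind fuel P (x : Int)).1 = comp.getD x 0 ∧ PVInv n' (pvFind fuel P (x : Int)).2 comp := by
  intro d
  induction d using Nat.strong_induction_on with
  | _ d ih =>
  intro P hInv x hx hr fuel hf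
  obtain ⟨f, rfl⟩ : ∃ f, fuel = f + 1 := ⟨fuel - 1, by omega⟩
  have hxlen : x < P.length := by rw [hInv.lenP]; exact hx
  have hgx : PySem.List.pyGetD P (x : Int) 0 = P.getD x 0 := by
    rw [PySem.List.pyGetD_eq_getElem P 0 (Int.natCast_nonneg x) (by exact_mod_cast hxlen),
        List.getD_eq_getElem P 0 hxlen]
    simp
  have hpg : P.getD x 0 = ((pvPg P x : Nat) : Int) := by
    have := hInv.rng x hx; simp only [pvPg]; omega
  rw [pvFind_succ]
  by_cases hroot : pvPg P x = x
  · rw [if_pos (by rw [hgx, hpg, hroot])]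
    exact ⟨(hInv.rootlab x hx hroot).symm, hInv⟩
  · have hplt : pvPg P x < n' := by have := hInv.rng x hx; simp only [pvPg] at *; omega
    have hplen : pvPg P x < P.length := by rw [hInv.lenP]; exact hplt
    have hne : ((pvPg P x : Nat) : Int) ≠ (x : Int) := by exact_mod_cast hroot
    rw [if_neg (by rw [hgx, hpg]; exact hne)]
    have hgp : PySem.List.pyGetD P (PySem.List.pyGetD P (x : Int) 0) 0
        = ((pvPg P (pvPg P x) : Nat) : Int) := by
      rw [hgx, hpg]
      rw [PySem.List.pyGetD_eq_getElem P 0 (Int.natCast_nonneg _) (by exact_mod_cast hplen)]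
      have h2 : P.getD (pvPg P x) 0 = ((pvPg P (pvPg P x) : Nat) : Int) := by
        have := hInv.rng _ hplt; simp only [pvPg] at *; omega
      rw [← List.getD_eq_getElem P 0 (by simpa using hplen)]
      simpa using h2
    rw [hgp]
    rw [PySem.List.pySetD_of_nonneg P _ (Int.natCast_nonneg x)]
    simp only [Int.toNat_natCast]
    set Q := P.set x ((pvPg P (pvPg P x) : Nat) : Int) with hQdef
    have hInvQ : PVInv n' Q comp := pv_compress_inv hInv hx hroot
    have hd1 : d ≠ 0 := fun h0 => hroot (by simpa [h0, pvRooted, pvIter] using hr)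
    obtain ⟨e, rfl⟩ : ∃ e, d = e + 1 := ⟨d - 1, by omega⟩
    have hr' : pvRooted P e (pvPg P x) := (pvRooted_succ_of_ne hroot e).mp hr
    by_cases hp : pvPg P (pvPg P x) = pvPg P x
    · rw [hp]
      have hrQ : pvRooted Q 0 (pvPg P x) := by
        show pvPg Q (pvPg P x) = pvPg P x
        rw [hQdef, pvPg_set' hxlen _ _, if_neg (fun he => hroot he.symm)]
        exact hp
      obtain ⟨h1, h2⟩ := ih 0 (by omega) Q hInvQ (pvPg P x) hplt hrQ f (by omega)
      exact ⟨h1.trans (hInv.compat x hx), h2⟩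
    · have he1 : e ≠ 0 := fun h0 => hp (by simpa [h0, pvRooted, pvIter] using hr')
      obtain ⟨g, rfl⟩ : ∃ g, e = g + 1 := ⟨e - 1, by omega⟩
      have hr'' : pvRooted P g (pvPg P (pvPg P x)) := (pvRooted_succ_of_ne hp g).mp hr'
      have ht : pvPg P (pvPg P x) < n' := by
        have := hInv.rng _ hplt; simp only [pvPg] at *; omega
      have hrQ : pvRooted Q g (pvPg P (pvPg P x)) :=
        pv_compress_rooted hxlen hroot ⟨g + 2, hr⟩ g _ hr''
      obtain ⟨h1, h2⟩ := ih g (by omega) Q hInvQ _ ht hrQ f (by omega)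
      refine ⟨h1.trans ?_, h2⟩
      rw [hInv.compat _ hplt]
      exact hInv.compat x hx

-- a negative argument to find behaves like its wrapped nonnegative form
theorem pv_find_neg {n' : Nat} {P comp : List Int} (hInv : PVInv n' P comp)
    {j : Int} (h1 : -(n' : Int) ≤ j) (h2 : j < 0) (fuel : Nat) :
    pvFind (fuel + 1) P j = pvFind (fuel + 1) P (j + n') := by
  have hL : P.length = n' := hInv.lenP
  have hn1 : 1 ≤ (n' : Int) := by omega
  have hw0 : 0 ≤ j + (n' : Int) := by omega
  have hwlt : j + (n' : Int) < (n' : Int) := by omega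
  have hwn : (j + (n' : Int)).toNat < n' := by omega
  have hwrap : PySem.List.pyGetD P j 0 = PySem.List.pyGetD P (j + (n' : Int)) 0 := by
    have h := pv_pyGetD_wrap P (by rw [hL]; exact h1) h2 0
    rw [h, hL]
  have hvald : PySem.List.pyGetD P (j + (n' : Int)) 0 = P.getD (j + (n' : Int)).toNat 0 := by
    rw [PySem.List.pyGetD_eq_getElem P 0 hw0 (by rw [hL]; exact_mod_cast hwlt),
        List.getD_eq_getElem P 0 (by rw [hL]; exact hwn)]
  have hv := hInv.rng _ hwn
  rw [pvFind_succ, pvFind_succ, hwrap]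
  by_cases hc : PySem.List.pyGetD P (j + (n' : Int)) 0 = j + (n' : Int)
  · rw [if_pos hc, if_neg (by rw [hc]; omega)]
    have hset : PySem.List.pySetD P j (PySem.List.pyGetD P (j + (n' : Int)) 0) = P := by
      rw [pv_pySetD_wrap P (by rw [hL]; exact h1) h2, hL,
          PySem.List.pySetD_of_nonneg P _ hw0, hvald]
      exact pv_set_self (by rw [hL]; exact hwn)
    rw [hc]
    rw [hset, hc]
    exact pvFind_root hc fuel
  · rw [if_neg hc, if_neg (by intro h; rw [hvald] at h; omega)]
    rw [pv_pySetD_wrap P (by rw [hL]; exact h1) h2, hL]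

theorem pv_getD_map {comp : List Int} (f : Int → Int) {k : Nat} (h : k < comp.length) :
    (comp.map f).getD k 0 = f (comp.getD k 0) := by
  rw [List.getD_eq_getElem _ _ (by simpa using h), List.getElem_map, List.getD_eq_getElem _ _ h]

theorem pv_countP_disj {l : List Nat} {p q r : Nat → Bool}
    (hpr : ∀ a ∈ l, p a = true → r a = true) (hqr : ∀ a ∈ l, q a = true → r a = true)
    (hdisj : ∀ a ∈ l, ¬(p a = true ∧ q a = true)) :
    l.countP p + l.countP q ≤ l.countP r := by
  induction l with
  | nil => simp
  | cons a l ih =>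
    have ih' := ih (fun b hb => hpr b (List.mem_cons_of_mem a hb))
                   (fun b hb => hqr b (List.mem_cons_of_mem a hb))
                   (fun b hb => hdisj b (List.mem_cons_of_mem a hb))
    simp only [List.countP_cons]
    by_cases hpa : p a = true <;> by_cases hqa : q a = true
    · exact absurd ⟨hpa, hqa⟩ (hdisj a List.mem_cons_self)
    · have hra := hpr a List.mem_cons_self hpa
      simp [hpa, hqa, hra]
      omega
    · have hra := hqr a List.mem_cons_self hqa
      simp [hpa, hqa, hra]
      omega
    · by_cases hra : r a = true <;> simp [hpa, hqa, hra] <;> omega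

theorem pv_countP_one {l : List Nat} {p : Nat → Bool} {a : Nat} (ha : a ∈ l) (hp : p a = true) :
    1 ≤ l.countP p := by
  rw [List.countP_eq_length_filter]
  exact List.length_pos_of_mem (List.mem_filter.mpr ⟨ha, hp⟩)

-- after parent[pi] = pj, every node of pi's class reaches pj in one more step
theorem pv_reach_extend {P : List Int} {piN pjN : Nat} (hplen : piN < P.length)
    (hpj_root : pvPg P pjN = pjN) (hpi_root : pvPg P piN = piN) (hneN : piN ≠ pjN) :
    ∀ d k, pvRooted P d k → pvIter P d k = piN →
      pvRooted (P.set piN ((pjN : Nat) : Int)) (d + 1) k := by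
  have hQ : ∀ m, pvPg (P.set piN ((pjN : Nat) : Int)) m = if piN = m then pjN else pvPg P m :=
    pvPg_set' hplen pjN
  have hQpi : pvPg (P.set piN ((pjN : Nat) : Int)) piN = pjN := by rw [hQ, if_pos rfl]
  have hQpj : pvPg (P.set piN ((pjN : Nat) : Int)) pjN = pjN := by
    rw [hQ, if_neg hneN]; exact hpj_root
  have base : pvRooted (P.set piN ((pjN : Nat) : Int)) 1 piN := by
    have hne' : pvPg (P.set piN ((pjN : Nat) : Int)) piN ≠ piN := by
      rw [hQpi]; exact fun h => hneN h.symm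
    rw [pvRooted_succ_of_ne hne']
    show pvPg _ (pvPg _ piN) = pvPg _ piN
    rw [hQpi]; exact hQpj
  intro d
  induction d with
  | zero =>
    intro k hd hit
    have hk : k = piN := by simpa [pvIter] using hit
    subst hk; exact base
  | succ d ih =>
    intro k hd hit
    by_cases hk : pvPg P k = k
    · have hkpi : k = piN := by rw [pvIter_of_root hk] at hit; exact hit
      subst hkpi
      exact pvRooted_mono base (by omega)
    · have hd' := (pvRooted_succ_of_ne hk d).mp hd
      have hit' : pvIter P d (pvPg P k) = piN := by
        rw [show pvIter P (d + 1) k = pvIter P d (pvPg P k) from by simp [pvIter, hk]] at hit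
        exact hit
      have hkpi : k ≠ piN := fun he => hk (by rw [he]; exact hpi_root)
      have hQk : pvPg (P.set piN ((pjN : Nat) : Int)) k = pvPg P k := by
        rw [hQ, if_neg (fun he => hkpi he.symm)]
      have hne' : pvPg (P.set piN ((pjN : Nat) : Int)) k ≠ k := by rw [hQk]; exact hk
      rw [pvRooted_succ_of_ne hne', hQk]
      exact ih _ hd' hit'

-- nodes of other classes never pass through pi, so their paths survive the union
theorem pv_reach_avoid {n' : Nat} {P comp : List Int} (hInv : PVInv n' P comp)
    {piN : Nat} (hpin : piN < n') (v : Int) :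
    ∀ d k, k < n' → comp.getD k 0 ≠ comp.getD piN 0 → pvRooted P d k →
      pvRooted (P.set piN v) d k := by
  have hQ : ∀ m, m ≠ piN → pvPg (P.set piN v) m = pvPg P m := by
    intro m hm; rw [pvPg_set, if_neg (fun hc => hm hc.1.symm)]
  intro d
  induction d with
  | zero =>
    intro k hk hlab hd
    have hkpi : k ≠ piN := fun he => hlab (by rw [he])
    show pvPg _ k = k
    rw [hQ k hkpi]; exact hd
  | succ d ih =>
    intro k hk hlab hd
    have hkpi : k ≠ piN := fun he => hlab (by rw [he])
    by_cases hroot : pvPg P k = k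
    · have hr : pvPg (P.set piN v) k = k := by rw [hQ k hkpi]; exact hroot
      unfold pvRooted; rw [pvIter_of_root hr]; exact hr
    · have hd' := (pvRooted_succ_of_ne hroot d).mp hd
      have hpk : pvPg P k < n' := by have := hInv.rng k hk; simp only [pvPg]; omega
      have hlab' : comp.getD (pvPg P k) 0 ≠ comp.getD piN 0 := by
        rw [hInv.compat k hk]; exact hlab
      have hne' : pvPg (P.set piN v) k ≠ k := by rw [hQ k hkpi]; exact hroot
      rw [pvRooted_succ_of_ne hne', hQ k hkpi]
      exact ih (pvPg P k) hpk hlab' hd'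

-- a union step on A's side matches a relabel step on B's side
theorem pv_union_inv {n' : Nat} {P comp : List Int} (hInv : PVInv n' P comp)
    {i' j' : Nat} (hi : i' < n') (hj : j' < n')
    (hne : comp.getD i' 0 ≠ comp.getD j' 0) :
    PVInv n' (P.set (comp.getD i' 0).toNat (comp.getD j' 0))
      (comp.map fun v => if v = comp.getD i' 0 then comp.getD j' 0 else v) := by
  set ri := comp.getD i' 0 with hri
  set rj := comp.getD j' 0 with hrj
  have hrib := hInv.crng i' hi
  have hrjb := hInv.crng j' hj
  set riN := ri.toNat with hriN
  set rjN := rj.toNat with hrjN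
  have hric : ((riN : Nat) : Int) = ri := Int.toNat_of_nonneg hrib.1
  have hrjc : ((rjN : Nat) : Int) = rj := Int.toNat_of_nonneg hrjb.1
  have hriln : riN < n' := by omega
  have hrjln : rjN < n' := by omega
  obtain ⟨di, hdi, _⟩ := hInv.reach i' hi
  have hi_lab : ((pvIter P di i' : Nat) : Int) = ri := pv_root_label hInv hi hdi
  have hit_i : pvIter P di i' = riN := by omega
  have hroot_ri : pvPg P riN = riN := by rw [← hit_i]; exact hdi
  obtain ⟨dj, hdj, _⟩ := hInv.reach j' hj
  have hj_lab : ((pvIter P dj j' : Nat) : Int) = rj := pv_root_label hInv hj hdj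
  have hit_j : pvIter P dj j' = rjN := by omega
  have hroot_rj : pvPg P rjN = rjN := by rw [← hit_j]; exact hdj
  have hlab_ri : comp.getD riN 0 = ri := by rw [hInv.rootlab riN hriln hroot_ri]; exact hric
  have hlab_rj : comp.getD rjN 0 = rj := by rw [hInv.rootlab rjN hrjln hroot_rj]; exact hrjc
  have hneN : riN ≠ rjN := fun h => hne (by rw [← hric, ← hrjc, h])
  have hPlen : riN < P.length := by rw [hInv.lenP]; exact hriln
  set f : Int → Int := fun v => if v = ri then rj else v with hf
  have hmapD : ∀ k, k < n' → (comp.map f).getD k 0 = if comp.getD k 0 = ri then rj else comp.getD k 0 := by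
    intro k hk; rw [pv_getD_map f (by rw [hInv.lenC]; exact hk)]
  have hsetD : ∀ k, k < n' → (P.set riN rj).getD k 0 = if riN = k then rj else P.getD k 0 := by
    intro k hk; rw [pv_getD_set]
    by_cases h : riN = k
    · rw [if_pos ⟨h, hPlen⟩, if_pos h]
    · rw [if_neg (fun hc => h hc.1), if_neg h]
  have hpg3 : ∀ k, pvPg (P.set riN rj) k = if riN = k then rjN else pvPg P k := by
    intro k
    rw [show rj = ((rjN : Nat) : Int) from hrjc.symm]
    exact pvPg_set' hPlen rjN k
  refine ⟨by simp [hInv.lenP], by simp [hInv.lenC], ?_, ?_, ?_, ?_, ?_⟩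
  · intro k hk; rw [hsetD k hk]
    by_cases h : riN = k
    · rw [if_pos h]; exact hrjb
    · rw [if_neg h]; exact hInv.rng k hk
  · intro k hk; rw [hmapD k hk]
    by_cases h : comp.getD k 0 = ri
    · rw [if_pos h]; exact hrjb
    · rw [if_neg h]; exact hInv.crng k hk
  · intro k hk
    by_cases h : riN = k
    · rw [← h]
      have e1 : (comp.map f).getD (pvPg (P.set riN rj) riN) 0 = rj := by
        rw [hpg3 riN, if_pos rfl, hmapD rjN hrjln, hlab_rj]
        split_ifs <;> rfl
      have e2 : (comp.map f).getD riN 0 = rj := by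
        rw [hmapD riN hriln, hlab_ri, if_pos rfl]
      rw [e1, e2]
    · have hpgk : pvPg (P.set riN rj) k = pvPg P k := by rw [hpg3 k, if_neg h]
      rw [hpgk]
      have hpk : pvPg P k < n' := by have := hInv.rng k hk; simp only [pvPg]; omega
      rw [hmapD _ hpk, hmapD k hk, hInv.compat k hk]
  · intro k hk hrootk
    by_cases h : riN = k
    · rw [hpg3 k, if_pos h] at hrootk
      exact absurd (h.trans hrootk.symm) hneN
    · rw [hpg3 k, if_neg h] at hrootk
      have hl := hInv.rootlab k hk hrootk
      rw [hmapD k hk, hl]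
      rw [if_neg]
      intro hc; apply h; omega
  · intro k hk
    obtain ⟨d, hd, hcard⟩ := hInv.reach k hk
    by_cases h : comp.getD k 0 = ri
    · have hit : pvIter P d k = riN := by
        have hlab := pv_root_label hInv hk hd
        rw [h] at hlab
        omega
      have hrooted3 : pvRooted (P.set riN rj) (d + 1) k := by
        rw [show rj = ((rjN : Nat) : Int) from hrjc.symm]
        exact pv_reach_extend hPlen hroot_rj hroot_ri hneN d k hd hit
      refine ⟨d + 1, hrooted3, ?_⟩
      have hck : (comp.map f).getD k 0 = rj := by rw [hmapD k hk, h, if_pos rfl]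
      rw [hck]
      have hsum : (List.range n').countP (fun m => decide (comp.getD m 0 = ri))
          + (List.range n').countP (fun m => decide (comp.getD m 0 = rj))
          ≤ (List.range n').countP (fun m => decide ((comp.map f).getD m 0 = rj)) := by
        apply pv_countP_disj
        · intro a ha hp
          simp only [decide_eq_true_eq] at *
          rw [hmapD a (List.mem_range.mp ha), hp, if_pos rfl]
        · intro a ha hq
          simp only [decide_eq_true_eq] at *
          rw [hmapD a (List.mem_range.mp ha), hq, if_neg (fun hx => hne hx.symm)]
        · rintro a ha ⟨hp, hq⟩
          simp only [decide_eq_true_eq] at hp hq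
          exact hne (hp.symm.trans hq)
      have hone : 1 ≤ (List.range n').countP (fun m => decide (comp.getD m 0 = rj)) :=
        pv_countP_one (List.mem_range.mpr hrjln) (by simp only [decide_eq_true_eq]; exact hlab_rj)
      have hcard' : d + 1 ≤ (List.range n').countP (fun m => decide (comp.getD m 0 = ri)) := by
        rw [← h]; exact hcard
      show d + 1 + 1 ≤ (List.range n').countP (fun m => decide ((comp.map f).getD m 0 = rj))
      omega
    · have hrooted3 : pvRooted (P.set riN rj) d k :=
        pv_reach_avoid hInv hriln rj d k hk (by rw [hlab_ri]; exact h) hd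
      refine ⟨d, hrooted3, ?_⟩
      have hck : (comp.map f).getD k 0 = comp.getD k 0 := by rw [hmapD k hk, if_neg h]
      rw [hck]
      refine le_trans hcard (List.countP_mono_left ?_)
      intro a ha hp
      simp only [decide_eq_true_eq] at *
      rw [hmapD a (List.mem_range.mp ha), hp]
      rw [if_neg h]

-- one loop-body step of A and of B preserve the simulation
theorem pv_step_sim {n' : Nat} {P comp : List Int} (hInv : PVInv n' P comp)
    {i j : Int} (hi0 : 0 ≤ i) (hi1 : i < (n' : Int)) (hj0 : -(n' : Int) ≤ j) (hj1 : j < (n' : Int)) :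
    PVInv n' (pvUnionStep P (i, j)) (pvMergeStep comp (i, j)) := by
  have hicast : i = ((i.toNat : Nat) : Int) := (Int.toNat_of_nonneg hi0).symm
  have hi' : i.toNat < n' := by omega
  obtain ⟨d1, hd1, hc1⟩ := hInv.reach i.toNat hi'
  have hfuel1 : d1 < P.length + 1 := by
    have h := pvCcard_le (n' := n') comp (comp.getD i.toNat 0)
    have hL := hInv.lenP
    omega
  obtain ⟨hr1, hInv1⟩ := pv_find_spec d1 P hInv i.toNat hi' hd1 (P.length + 1) hfuel1
  simp only [pvUnionStep, pvMergeStep]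
  have e1 : (pvFind (P.length + 1) P i).1 = comp.getD i.toNat 0 := by rw [hicast]; exact hr1
  have e1' : PVInv n' (pvFind (P.length + 1) P i).2 comp := by rw [hicast]; exact hInv1
  set P1 := (pvFind (P.length + 1) P i).2 with hP1
  have hL1 : P1.length = n' := e1'.lenP
  have hgi : PySem.List.pyGetD comp i 0 = comp.getD i.toNat 0 := by
    rw [PySem.List.pyGetD_eq_getElem comp 0 hi0 (by rw [hInv.lenC]; exact hi1),
        List.getD_eq_getElem comp 0 (by rw [hInv.lenC]; exact hi')]
  by_cases hjsgn : 0 ≤ j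
  · have hjcast : j = ((j.toNat : Nat) : Int) := (Int.toNat_of_nonneg hjsgn).symm
    have hj' : j.toNat < n' := by omega
    obtain ⟨d2, hd2, hc2⟩ := e1'.reach j.toNat hj'
    have hfuel2 : d2 < P1.length + 1 := by
      have h := pvCcard_le (n' := n') comp (comp.getD j.toNat 0)
      omega
    obtain ⟨hr2, hInv2⟩ := pv_find_spec d2 P1 e1' j.toNat hj' hd2 (P1.length + 1) hfuel2
    have e2 : (pvFind (P1.length + 1) P1 j).1 = comp.getD j.toNat 0 := by rw [hjcast]; exact hr2
    have e2' : PVInv n' (pvFind (P1.length + 1) P1 j).2 comp := by rw [hjcast]; exact hInv2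
    have hgj : PySem.List.pyGetD comp j 0 = comp.getD j.toNat 0 := by
      rw [PySem.List.pyGetD_eq_getElem comp 0 hjsgn (by rw [hInv.lenC]; exact hj1),
          List.getD_eq_getElem comp 0 (by rw [hInv.lenC]; exact hj')]
    rw [e1, e2, hgi, hgj]
    by_cases hEq : comp.getD i.toNat 0 = comp.getD j.toNat 0
    · rw [if_neg (not_not_intro hEq), if_neg (not_not_intro hEq)]
      exact e2'
    · rw [if_pos hEq, if_pos hEq]
      rw [PySem.List.pySetD_of_nonneg _ _ (hInv.crng i.toNat hi').1]
      exact pv_union_inv e2' hi' hj' hEq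
  · have hjneg : j < 0 := by omega
    have hwrapF : pvFind (P1.length + 1) P1 j = pvFind (P1.length + 1) P1 (j + (n' : Int)) :=
      pv_find_neg e1' hj0 hjneg P1.length
    have hwrapC : PySem.List.pyGetD comp j 0 = PySem.List.pyGetD comp (j + (n' : Int)) 0 := by
      have h := pv_pyGetD_wrap comp (by rw [hInv.lenC]; exact hj0) hjneg 0
      rw [h, hInv.lenC]
    rw [hwrapF, hwrapC]
    have hw0 : 0 ≤ j + (n' : Int) := by omega
    have hjcast : j + (n' : Int) = (((j + (n' : Int)).toNat : Nat) : Int) := (Int.toNat_of_nonneg hw0).symm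
    have hj' : (j + (n' : Int)).toNat < n' := by omega
    obtain ⟨d2, hd2, hc2⟩ := e1'.reach (j + (n' : Int)).toNat hj'
    have hfuel2 : d2 < P1.length + 1 := by
      have h := pvCcard_le (n' := n') comp (comp.getD (j + (n' : Int)).toNat 0)
      omega
    obtain ⟨hr2, hInv2⟩ := pv_find_spec d2 P1 e1' (j + (n' : Int)).toNat hj' hd2 (P1.length + 1) hfuel2
    have e2 : (pvFind (P1.length + 1) P1 (j + (n' : Int))).1 = comp.getD (j + (n' : Int)).toNat 0 := by
      rw [hjcast]; exact hr2
    have e2' : PVInv n' (pvFind (P1.length + 1) P1 (j + (n' : Int))).2 comp := by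
      rw [hjcast]; exact hInv2
    have hgj : PySem.List.pyGetD comp (j + (n' : Int)) 0 = comp.getD (j + (n' : Int)).toNat 0 := by
      rw [PySem.List.pyGetD_eq_getElem comp 0 hw0 (by rw [hInv.lenC]; omega),
          List.getD_eq_getElem comp 0 (by rw [hInv.lenC]; exact hj')]
    rw [e1, e2, hgi, hgj]
    by_cases hEq : comp.getD i.toNat 0 = comp.getD (j + (n' : Int)).toNat 0
    · rw [if_neg (not_not_intro hEq), if_neg (not_not_intro hEq)]
      exact e2'
    · rw [if_pos hEq, if_pos hEq]
      rw [PySem.List.pySetD_of_nonneg _ _ (hInv.crng i.toNat hi').1]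
      exact pv_union_inv e2' hi' hj' hEq

theorem pv_fold_sim {n' : Nat} :
    ∀ (l : List (Int × Int)) (P comp : List Int), PVInv n' P comp →
      (∀ p ∈ l, 0 ≤ p.1 ∧ p.1 < (n' : Int) ∧ -(n' : Int) ≤ p.2 ∧ p.2 < (n' : Int)) →
      PVInv n' (l.foldl pvUnionStep P) (l.foldl pvMergeStep comp) := by
  intro l
  induction l with
  | nil => intro P comp h _; exact h
  | cons p l ih =>
    intro P comp h hb
    have hp := hb p (List.mem_cons_self)
    exact ih _ _ (pv_step_sim h hp.1 hp.2.1 hp.2.2.1 hp.2.2.2) (fun q hq => hb q (List.mem_cons_of_mem _ hq))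

theorem pv_init_inv (n' : Nat) :
    PVInv n' ((List.range n').map Int.ofNat) ((List.range n').map Int.ofNat) := by
  have hg : ∀ k, k < n' → ((List.range n').map Int.ofNat).getD k 0 = (k : Int) :=
    fun k hk => PySem.List.getD_map_range Int.ofNat n' k 0 hk
  have hpg : ∀ k, k < n' → pvPg ((List.range n').map Int.ofNat) k = k := by
    intro k hk; unfold pvPg; rw [hg k hk]; simp
  refine ⟨by simp, by simp, ?_, ?_, ?_, ?_, ?_⟩
  · intro k hk; rw [hg k hk]; exact ⟨by positivity, by exact_mod_cast hk⟩
  · intro k hk; rw [hg k hk]; exact ⟨by positivity, by exact_mod_cast hk⟩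
  · intro k hk; rw [hpg k hk]
  · intro k hk _; exact hg k hk
  · intro k hk
    refine ⟨0, hpg k hk, ?_⟩
    exact pv_countP_one (List.mem_range.mpr hk) (by simp)

theorem pv_perms_sim {n : Int} {perms : List (List Int)} (hPre : Pre_equiv_groups_py n perms) :
    PVInv n.toNat
      (perms.foldl (fun P perm => (PySem.List.enumerate perm).foldl pvUnionStep P)
        ((List.range n.toNat).map Int.ofNat))
      (perms.foldl (fun c perm => (PySem.List.enumerate perm).foldl pvMergeStep c)
        ((List.range n.toNat).map Int.ofNat)) := by
  have main : ∀ (ps : List (List Int)) (P comp : List Int), PVInv n.toNat P comp →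
      (∀ perm ∈ ps, perm.length ≤ n.toNat ∧ ∀ j ∈ perm, -n ≤ j ∧ j < n) →
      PVInv n.toNat (ps.foldl (fun P perm => (PySem.List.enumerate perm).foldl pvUnionStep P) P)
        (ps.foldl (fun c perm => (PySem.List.enumerate perm).foldl pvMergeStep c) comp) := by
    intro ps
    induction ps with
    | nil => intro P comp h _; exact h
    | cons perm ps ih =>
      intro P comp h hPre
      obtain ⟨hlen, hent⟩ := hPre perm List.mem_cons_self
      simp only [List.foldl_cons]
      apply ih _ _ ?_ (fun q hq => hPre q (List.mem_cons_of_mem _ hq))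
      apply pv_fold_sim _ _ _ h
      intro p hp
      rw [PySem.List.mem_enumerate_iff] at hp
      obtain ⟨k, hk, rfl⟩ := hp
      have hkn : k < n.toNat := lt_of_lt_of_le hk hlen
      obtain ⟨hj1, hj2⟩ := hent perm[k] (List.getElem_mem hk)
      refine ⟨by omega, by omega, by omega, by omega⟩
  exact main perms _ _ (pv_init_inv n.toNat) hPre

-- the two grouping loops build the same dict
theorem pv_group_fold {n' : Nat} {comp : List Int} :
    ∀ (l : List Int), (∀ i ∈ l, 0 ≤ i ∧ i < (n' : Int)) →
      ∀ (P : List Int) (g : PySem.Dict Int (List Int)), PVInv n' P comp →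
      (l.foldl (fun (st : List Int × PySem.Dict Int (List Int)) i =>
          let r := pvFind (st.1.length + 1) st.1 i
          (r.2, st.2.modify r.1 [] (fun xs => xs ++ [i]))) (P, g)).2
        = l.foldl (fun g i => g.modify (PySem.List.pyGetD comp i 0) [] (fun xs => xs ++ [i])) g := by
  intro l
  induction l with
  | nil => intro _ P g _; rfl
  | cons i l ih =>
    intro hb P g hInv
    obtain ⟨hi0, hi1⟩ := hb i List.mem_cons_self
    have hi' : i.toNat < n' := by omega
    have hicast : i = ((i.toNat : Nat) : Int) := (Int.toNat_of_nonneg hi0).symm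
    obtain ⟨d, hd, hc⟩ := hInv.reach i.toNat hi'
    have hfuel : d < P.length + 1 := by
      have h := pvCcard_le (n' := n') comp (comp.getD i.toNat 0)
      have hL := hInv.lenP
      omega
    obtain ⟨h1, h2⟩ := pv_find_spec d P hInv i.toNat hi' hd (P.length + 1) hfuel
    have h1' : (pvFind (P.length + 1) P i).1 = comp.getD i.toNat 0 := by rw [hicast]; exact h1
    have hkey : (pvFind (P.length + 1) P i).1 = PySem.List.pyGetD comp i 0 := by
      rw [h1', PySem.List.pyGetD_eq_getElem comp 0 hi0 (by rw [hInv.lenC]; exact hi1),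
          List.getD_eq_getElem comp 0 (by rw [hInv.lenC]; exact hi')]
    have hInv2 : PVInv n' (pvFind (P.length + 1) P i).2 comp := by rw [hicast]; exact h2
    simp only [List.foldl_cons]
    show (List.foldl _ ((pvFind (P.length + 1) P i).2,
        g.modify (pvFind (P.length + 1) P i).1 [] (fun xs => xs ++ [i])) l).2 = _
    rw [hkey]
    exact ih (fun x hx => hb x (List.mem_cons_of_mem _ hx)) _ _ hInv2

-- ===== VERDICT (by name: the statement is the Claim_ definition above) =====
theorem equiv_groups_py_spec : Claim_equal_equiv_groups_py := by
  intro n perms _ hPre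
  unfold Spec_equiv_groups_py equiv_groups_py equiv_groups_py_alt
  have hInv := pv_perms_sim hPre
  have hb : ∀ i ∈ PySem.List.pyRange 0 n 1, 0 ≤ i ∧ i < ((n.toNat : Nat) : Int) := by
    intro i hi
    rw [PySem.List.mem_pyRange_one] at hi
    exact ⟨hi.1, lt_of_lt_of_le hi.2 (Int.self_le_toNat n)⟩
  exact congrArg PySem.Dict.values
    (pv_group_fold (PySem.List.pyRange 0 n 1) hb _ PySem.Dict.empty hInv)
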